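-- pv_equiv track=rewrite | github.com/sportwhiz/DomainCamelConverter | app.py | merge_short_tokens
-- ===== SOURCE A (Python) =====
-- def merge_short_tokens(tokens, max_length=2):
--     """
--     Merge consecutive tokens that are very short (length <= max_length).
--     For instance, ["s", "a", "co", "maine"] becomes ["saco", "maine"].
--     """
--     merged = []
--     buffer = []
--     for token in tokens:
--         if len(token) <= max_length:
--             buffer.append(token)
--         else:
--             if buffer:
--                 # Merge the buffered tokens into one token
--                 merged.append(''.join(buffer))
--                 buffer = []
--             merged.append(token)
--     if buffer:
--         merged.append(''.join(buffer))
--     return merged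
-- ===== SOURCE B (Python) =====
-- from itertools import groupby
--
-- def merge_short_tokens(tokens, max_length=2):
--     """Group the sequence into maximal runs of short/long tokens, then
--     join each short run and emit long-run tokens individually."""
--     result = []
--     for is_short, run in groupby(tokens, key=lambda t: len(t) <= max_length):
--         if is_short:
--             result.append(''.join(run))
--         else:
--             result.extend(run)
--     return result
-- ===== Notes on version B (the rewrite author's own statement) =====
-- stated objective: idiomatic
-- what changed: Replaces the explicit buffer-and-flush loop with itertools.groupby on the shortness key: the runs are computed first, then each short run is joined and long runs are emitted as-is.
import Mathlib
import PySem

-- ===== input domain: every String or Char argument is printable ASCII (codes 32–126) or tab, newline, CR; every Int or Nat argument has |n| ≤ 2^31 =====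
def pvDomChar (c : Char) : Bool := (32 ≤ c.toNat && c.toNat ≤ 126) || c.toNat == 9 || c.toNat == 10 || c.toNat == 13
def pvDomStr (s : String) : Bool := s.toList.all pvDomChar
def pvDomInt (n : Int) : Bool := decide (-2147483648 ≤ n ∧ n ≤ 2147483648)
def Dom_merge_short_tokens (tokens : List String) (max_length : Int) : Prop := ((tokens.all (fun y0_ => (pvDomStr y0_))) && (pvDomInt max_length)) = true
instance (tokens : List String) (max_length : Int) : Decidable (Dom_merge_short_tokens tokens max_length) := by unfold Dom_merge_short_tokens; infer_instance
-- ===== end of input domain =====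

-- B replaces A's explicit buffer-and-flush loop by grouping the tokens into
-- maximal consecutive short/long runs first (itertools.groupby), then joining
-- each short run and emitting long runs as-is (idiomatic; same cost).

-- ===== PORT A =====
-- A's loop: state (merged, buffer); on a short token extend buffer, on a long
-- one flush the buffer (if nonempty) then append the token; final flush.
def mergeGoA (max_length : Int) (merged buffer : List String) : List String → List String
  | [] => if buffer.isEmpty then merged else merged ++ [PySem.Str.join "" buffer]
  | t :: ts =>
    if PySem.Str.len t ≤ max_length then
      mergeGoA max_length merged (buffer ++ [t]) ts
    else
      mergeGoA max_length
        ((if buffer.isEmpty then merged else merged ++ [PySem.Str.join "" buffer]) ++ [t]) [] ts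

def merge_short_tokens (tokens : List String) (max_length : Int) : List String :=
  mergeGoA max_length [] [] tokens

-- ===== PORT B =====
-- groupby(tokens, key = len(t) <= max_length): maximal runs with their key.
def shortKey (max_length : Int) (t : String) : Bool := PySem.Str.len t ≤ max_length

def runsB (max_length : Int) : List String → List (Bool × List String)
  | [] => []
  | t :: ts =>
    match runsB max_length ts with
    | [] => [(shortKey max_length t, [t])]
    | (k, r) :: rest =>
      if shortKey max_length t = k then (k, t :: r) :: rest
      else (shortKey max_length t, [t]) :: (k, r) :: rest

def merge_short_tokens_alt (tokens : List String) (max_length : Int) : List String :=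
  (runsB max_length tokens).flatMap
    (fun g => if g.1 then [PySem.Str.join "" g.2] else g.2)

-- ===== PRECONDITION & SPEC =====
def Spec_merge_short_tokens (tokens : List String) (max_length : Int) (out : List String) : Prop := out = merge_short_tokens_alt tokens max_length
instance (tokens : List String) (max_length : Int) (out : List String) : Decidable (Spec_merge_short_tokens tokens max_length out) := by unfold Spec_merge_short_tokens; infer_instance

-- ===== CLAIM (what is proved, stated in full; the proofs are below) =====
def Claim_equal_merge_short_tokens : Prop := ∀ (tokens : List String) (max_length : Int), Dom_merge_short_tokens tokens max_length → Spec_merge_short_tokens tokens max_length (merge_short_tokens tokens max_length)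

-- ===== LEMMAS AND PROOFS =====

-- flatten B's runs into the output
def flatRuns (rs : List (Bool × List String)) : List String :=
  rs.flatMap (fun g => if g.1 then [PySem.Str.join "" g.2] else g.2)

-- prepend a pending short buffer to the run list
def pushBuf (buffer : List String) (rs : List (Bool × List String)) : List (Bool × List String) :=
  if buffer.isEmpty then rs
  else
    match rs with
    | (true, r) :: rest => (true, buffer ++ r) :: rest
    | _ => (true, buffer) :: rs

theorem mergeGoA_eq (max_length : Int) (ts : List String) :
    ∀ merged buffer,
      mergeGoA max_length merged buffer ts = merged ++ flatRuns (pushBuf buffer (runsB max_length ts)) := by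
  induction ts with
  | nil =>
    intro merged buffer
    by_cases hb : buffer.isEmpty <;>
      simp [mergeGoA, runsB, pushBuf, flatRuns, hb]
  | cons t ts ih =>
    intro merged buffer
    by_cases hk : shortKey max_length t
    · -- short token: buffered
      have : mergeGoA max_length merged buffer (t :: ts)
          = mergeGoA max_length merged (buffer ++ [t]) ts := by
        simp [mergeGoA, shortKey] at hk ⊢; omega
      rw [this, ih]
      congr 1
      -- runs of (t :: ts) with buffer = runs of ts with buffer ++ [t]
      cases h : runsB max_length ts with
      | nil =>
        cases buffer <;> simp [runsB, h, pushBuf, hk]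
      | cons g rest =>
        obtain ⟨k, r⟩ := g
        by_cases hkk : k
        · subst hkk
          cases buffer <;> simp [runsB, h, pushBuf, hk]
        · have hkf : k = false := by simpa using hkk
          subst hkf
          cases buffer <;> simp [runsB, h, pushBuf, hk]
    · -- long token: flush and emit
      have : mergeGoA max_length merged buffer (t :: ts)
          = mergeGoA max_length
              ((if buffer.isEmpty then merged else merged ++ [PySem.Str.join "" buffer]) ++ [t]) [] ts := by
        simp [mergeGoA, shortKey] at hk ⊢; omega
      rw [this, ih]
      have hflush : flatRuns (pushBuf buffer (runsB max_length (t :: ts)))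
          = (if buffer.isEmpty then [] else [PySem.Str.join "" buffer]) ++ [t]
            ++ flatRuns (pushBuf [] (runsB max_length ts)) := by
        cases h : runsB max_length ts with
        | nil =>
          cases buffer <;> simp [runsB, h, pushBuf, hk, flatRuns]
        | cons g rest =>
          obtain ⟨k, r⟩ := g
          by_cases hkk : k
          · subst hkk
            cases buffer <;> simp [runsB, h, pushBuf, hk, flatRuns]
          · have hkf : k = false := by simpa using hkk
            subst hkf
            cases buffer <;> simp [runsB, h, pushBuf, hk, flatRuns]
      rw [hflush]
      by_cases hb : buffer.isEmpty <;> simp [hb]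

-- ===== VERDICT (by name: the statement is the Claim_ definition above) =====
theorem merge_short_tokens_spec : Claim_equal_merge_short_tokens := by
  intro tokens max_length _
  unfold Spec_merge_short_tokens merge_short_tokens merge_short_tokens_alt
  rw [mergeGoA_eq]
  simp [pushBuf, flatRuns]
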